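-- pv_equiv track=rewrite | github.com/AlinaShautsova/pymar2024 | homework8_subsequence.py | will_it_be_strictly_increasing
-- ===== SOURCE A (Python) =====
-- def test_for_increasing_function(arr):
--     """Testing for increasing function."""
--     for i in range(len(arr) - 1):
--         if arr[i] >= arr[i + 1]:
--             return False
--     return True
--
-- def will_it_be_strictly_increasing(arr):
--     """The function slices through and checks on increasing."""
--     if test_for_increasing_function(arr):
--         return True
--
--     for i in range(len(arr)):
--         new_arr = arr[:i] + arr[i + 1:]
--         if test_for_increasing_function(new_arr):
--             return True
--     return False
-- ===== SOURCE B (Python) =====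
-- def _inc(xs):
--     """Strictly increasing pairwise check."""
--     return all(x < y for x, y in zip(xs, xs[1:]))
--
-- def will_it_be_strictly_increasing(arr):
--     """O(n): only removing one of the two elements of the FIRST adjacent
--     violation can possibly make the array strictly increasing."""
--     for i in range(len(arr) - 1):
--         if arr[i] >= arr[i + 1]:
--             return _inc(arr[:i] + arr[i + 1:]) or _inc(arr[:i + 1] + arr[i + 2:])
--     return True
-- ===== Notes on version B (the rewrite author's own statement) =====
-- stated objective: faster
-- what changed: Instead of testing all n one-element removals (each building an O(n) slice), B scans once for the first adjacent violation and tests only the two removals that can possibly fix it.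
import Mathlib
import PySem

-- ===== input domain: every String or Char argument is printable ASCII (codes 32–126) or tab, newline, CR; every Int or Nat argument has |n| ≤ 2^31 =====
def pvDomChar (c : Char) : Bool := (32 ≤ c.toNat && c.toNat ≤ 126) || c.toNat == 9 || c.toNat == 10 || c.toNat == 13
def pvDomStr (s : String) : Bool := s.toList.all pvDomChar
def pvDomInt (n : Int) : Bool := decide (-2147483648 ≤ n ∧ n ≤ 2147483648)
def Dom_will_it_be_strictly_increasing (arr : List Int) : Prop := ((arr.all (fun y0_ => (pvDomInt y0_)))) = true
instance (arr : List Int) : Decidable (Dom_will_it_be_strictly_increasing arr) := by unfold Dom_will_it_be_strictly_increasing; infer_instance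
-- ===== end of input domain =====

-- B scans once for the first adjacent violation and tests only the two removals that can fix it,
-- instead of A's test of all n one-element removals; equivalence of return values is proved below.


-- ===== PORT A =====
-- `for i in range(len(arr)-1): if arr[i] >= arr[i+1]: return False / return True`;
-- all indices are in range, so `getD _ 0` is exact for Python's `arr[i]`.
def test_for_increasing_function (arr : List Int) : Bool :=
  (List.range (arr.length - 1)).all (fun i => !(decide (arr.getD i 0 ≥ arr.getD (i + 1) 0)))

-- `arr[:i] + arr[i+1:]` with 0 ≤ i ≤ len(arr) is exactly `take i ++ drop (i+1)`.
def will_it_be_strictly_increasing (arr : List Int) : Bool :=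
  if test_for_increasing_function arr then true
  else
    (List.range arr.length).any
      (fun i => test_for_increasing_function (arr.take i ++ arr.drop (i + 1)))

-- ===== PORT B =====
-- `all(x < y for x, y in zip(xs, xs[1:]))`
def inc_alt : List Int → Bool
  | [] => true
  | [_] => true
  | a :: b :: t => decide (a < b) && inc_alt (b :: t)

-- first i in range(len-1) with arr[i] >= arr[i+1] (early return), then the two local removals
def will_it_be_strictly_increasing_alt (arr : List Int) : Bool :=
  match (List.range (arr.length - 1)).find? (fun i => decide (arr.getD i 0 ≥ arr.getD (i + 1) 0)) with
  | none => true
  | some i =>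
      inc_alt (arr.take i ++ arr.drop (i + 1)) || inc_alt (arr.take (i + 1) ++ arr.drop (i + 2))

-- ===== PRECONDITION & SPEC =====
def Spec_will_it_be_strictly_increasing (arr : List Int) (out : Bool) : Prop := out = will_it_be_strictly_increasing_alt arr
instance (arr : List Int) (out : Bool) : Decidable (Spec_will_it_be_strictly_increasing arr out) := by unfold Spec_will_it_be_strictly_increasing; infer_instance

-- ===== CLAIM (what is proved, stated in full; the proofs are below) =====
def Claim_equal_will_it_be_strictly_increasing : Prop := ∀ (arr : List Int), Dom_will_it_be_strictly_increasing arr → Spec_will_it_be_strictly_increasing arr (will_it_be_strictly_increasing arr)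

-- ===== LEMMAS AND PROOFS =====

-- pointwise (getD) characterisation of strict increase
def IncIdx (l : List Int) : Prop := ∀ i, i + 1 < l.length → l.getD i 0 < l.getD (i + 1) 0

lemma incIdx_cons (a b : Int) (t : List Int) :
    IncIdx (a :: b :: t) ↔ a < b ∧ IncIdx (b :: t) := by
  constructor
  · intro h
    refine ⟨h 0 (by simp), fun i hi => h (i + 1) (by simpa using hi)⟩
  · rintro ⟨hab, h⟩ i hi
    cases i with
    | zero => simpa using hab
    | succ j => exact h j (by simpa using hi)

lemma inc_alt_iff (l : List Int) : inc_alt l = true ↔ IncIdx l := by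
  induction l with
  | nil => simp [inc_alt, IncIdx]
  | cons a t ih =>
    cases t with
    | nil =>
      simp [inc_alt, IncIdx]
    | cons b t' =>
      rw [inc_alt, Bool.and_eq_true, decide_eq_true_iff, ih, incIdx_cons]

lemma test_iff (arr : List Int) : test_for_increasing_function arr = true ↔ IncIdx arr := by
  unfold test_for_increasing_function IncIdx
  simp only [List.all_eq_true, List.mem_range, Bool.not_eq_eq_eq_not, Bool.not_true,
    decide_eq_false_iff_not, not_le]
  constructor <;> exact fun h i hi => h i (by omega)

-- removal of element j
def rm (arr : List Int) (j : Nat) : List Int := arr.take j ++ arr.drop (j + 1)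

lemma rm_length (arr : List Int) (j : Nat) (hj : j < arr.length) :
    (rm arr j).length = arr.length - 1 := by
  simp [rm]; omega

lemma rm_getD_lt (arr : List Int) (j k : Nat) (hk : k < j) (hkl : k < arr.length) :
    (rm arr j).getD k 0 = arr.getD k 0 := by
  have h1 : k < (arr.take j).length := by simp; omega
  rw [rm, List.getD_eq_getElem?_getD, List.getElem?_append_left h1,
      List.getD_eq_getElem?_getD]
  congr 1
  rw [List.getElem?_eq_getElem h1, List.getElem?_eq_getElem hkl]
  simp [List.getElem_take]

lemma rm_getD_ge (arr : List Int) (j k : Nat) (hj : j < arr.length) (hjk : j ≤ k) :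
    (rm arr j).getD k 0 = arr.getD (k + 1) 0 := by
  by_cases hk : k + 1 < arr.length
  · have htl : (arr.take j).length = j := by simp; omega
    have h1 : ¬ k < (arr.take j).length := by omega
    have h2 : k - j < (arr.drop (j + 1)).length := by simp; omega
    rw [rm, List.getD_eq_getElem?_getD, List.getElem?_append_right (by omega),
        List.getD_eq_getElem?_getD, htl]
    rw [List.getElem?_eq_getElem h2, List.getElem?_eq_getElem hk]
    simp only [List.getElem_drop, Option.getD_some]
    congr 1
    omega
  · have hlen : (rm arr j).length ≤ k := by rw [rm_length arr j hj]; omega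
    rw [List.getD_eq_default _ _ hlen, List.getD_eq_default _ _ (by omega)]

-- a violation at i survives removal of any j ∉ {i, i+1}
lemma rm_not_inc (arr : List Int) (i j : Nat) (hi : i + 1 < arr.length)
    (hv : arr.getD i 0 ≥ arr.getD (i + 1) 0) (hj : j ≤ arr.length)
    (hji : j ≠ i) (hji1 : j ≠ i + 1) : ¬ IncIdx (rm arr j) := by
  intro h
  by_cases hjlen : j < arr.length
  · have hlen := rm_length arr j hjlen
    rcases Nat.lt_or_ge j i with hlt | hge
    · -- j < i : pair is at positions i-1, i in rm arr j
      have hi1 : 1 ≤ i := by omega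
      have hkl : (i - 1) + 1 < (rm arr j).length := by omega
      have := h (i - 1) hkl
      rw [rm_getD_ge arr j (i - 1) hjlen (by omega),
          rm_getD_ge arr j ((i - 1) + 1) hjlen (by omega)] at this
      have e1 : i - 1 + 1 = i := by omega
      rw [e1] at this
      omega
    · -- j > i+1 : pair is at positions i, i+1
      have hgt : i + 1 < j := by omega
      have hkl : i + 1 < (rm arr j).length := by omega
      have := h i hkl
      rw [rm_getD_lt arr j i (by omega) (by omega),
          rm_getD_lt arr j (i + 1) (by omega) (by omega)] at this
      omega
  · -- j = arr.length : rm arr j = arr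
    have hje : j = arr.length := by omega
    have : rm arr j = arr := by
      simp [rm, hje]
    rw [this] at h
    exact absurd (h i hi) (by omega)

-- ===== VERDICT (by name: the statement is the Claim_ definition above) =====
theorem will_it_be_strictly_increasing_spec : Claim_equal_will_it_be_strictly_increasing := by
  intro arr _
  unfold Spec_will_it_be_strictly_increasing will_it_be_strictly_increasing
      will_it_be_strictly_increasing_alt
  cases hf : (List.range (arr.length - 1)).find?
      (fun i => decide (arr.getD i 0 ≥ arr.getD (i + 1) 0)) with
  | none =>
    -- no violation anywhere: A's first test succeeds
    have htest : test_for_increasing_function arr = true := by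
      rw [test_iff]
      intro i hi
      have := List.find?_eq_none.mp hf i (by simp; omega)
      simpa using this
    simp [htest]
  | some i =>
    have hmem : i ∈ List.range (arr.length - 1) := List.mem_of_find?_eq_some hf
    have hi : i + 1 < arr.length := by
      have := List.mem_range.mp hmem; omega
    have hv : arr.getD i 0 ≥ arr.getD (i + 1) 0 := by
      have := List.find?_some hf; simpa using this
    have htest : test_for_increasing_function arr = false := by
      rw [← Bool.not_eq_true, test_iff]
      intro h
      exact absurd (h i hi) (by omega)
    simp only [htest, Bool.false_eq_true, if_false]
    -- both sides reduce to: some removal in {i, i+1} is increasing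
    refine Bool.eq_iff_iff.mpr ?_
    constructor
    · intro h
      obtain ⟨j, hjm, hjt⟩ := List.any_eq_true.mp h
      have hjlen : j < arr.length := List.mem_range.mp hjm
      have hinc : IncIdx (rm arr j) := (test_iff _).mp hjt
      rcases Classical.em (j = i) with rfl | hne
      · have h2 := (inc_alt_iff _).mpr hinc
        simp only [rm] at h2
        simp [h2]
      rcases Classical.em (j = i + 1) with rfl | hne1
      · have h2 := (inc_alt_iff _).mpr hinc
        simp only [rm] at h2
        simp [h2]
      · exact absurd hinc (rm_not_inc arr i j hi hv (by omega) hne hne1)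
    · intro h
      rcases (by simpa using h : inc_alt (rm arr i) = true ∨ inc_alt (rm arr (i+1)) = true) with h1 | h1
      · exact List.any_eq_true.mpr ⟨i, List.mem_range.mpr (by omega),
          (test_iff _).mpr ((inc_alt_iff _).mp h1)⟩
      · exact List.any_eq_true.mpr ⟨i + 1, List.mem_range.mpr (by omega),
          (test_iff _).mpr ((inc_alt_iff _).mp h1)⟩
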